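-- pv_equiv track=rewrite | github.com/VladSheremetev/Avito_dz | TfidfVectorizer.py | count_words_in_list_text
-- ===== SOURCE A (Python) =====
-- import typing as t
--
-- def count_words_in_list_text(list_text: t.Iterable) -> t.Tuple[t.List[str], t.List[str]]:
--     """Функция, которая считает количество отдельных слов в последовательности текстов"""
--     unique_words = get_unique_words_in_list_text(list_text)
--     count_word_in_text = []
--     for text in list_text:
--         zero_values(unique_words)
--         for word in text.split():
--             word = word.strip('.,;:-?"!').lower()
--             unique_words[word] += 1
--         count_word_in_text.append(list(unique_words.values()))
--
--     return list(unique_words.keys()), count_word_in_text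
--
-- def zero_values(dict_words: t.Dict[str, int]) -> None:
--     """Функция, которая обнуляет счётчик слов"""
--     for key in dict_words.keys():
--         dict_words[key] = 0
--
-- def get_unique_words_in_list_text(list_text: t.List[str]) -> t.Dict[str, int]:
--     """Функция, которая создаёт словарь со всеми уникальными словами во всех последовательностях текстов\
--     в качестве ключей, а счётчик слов в качестве values
--     """
--     unique_words = {}
--     for text in list_text:
--         for word in text.split():
--             word = word.strip('.,;:-?"!').lower()
--             unique_words[word] = 0
--     return unique_words
-- ===== SOURCE B (Python) =====
-- import typing as t
--
-- def count_words_in_list_text(list_text: t.Iterable) -> t.Tuple[t.List[str], t.List[str]]: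
--     """Счёт слов: один список нормализованных слов на текст, словарь-порядок для словаря, count по тексту."""
--     words_per_text = [[w.strip('.,;:-?"!').lower() for w in text.split()]
--                       for text in list_text]
--     vocab = list(dict.fromkeys(w for ws in words_per_text for w in ws))
--     matrix = [[ws.count(w) for w in vocab] for ws in words_per_text]
--     return vocab, matrix
-- ===== Notes on version B (the rewrite author's own statement) =====
-- stated objective: simpler
-- what changed: B normalizes each text's words once into per-text lists, builds the vocabulary with dict.fromkeys over the flattened words, and produces each row by counting in that text's own word list, instead of A's shared mutable dict that is re-zeroed and incremented across two full scans with an in-place helper.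
import Mathlib
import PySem

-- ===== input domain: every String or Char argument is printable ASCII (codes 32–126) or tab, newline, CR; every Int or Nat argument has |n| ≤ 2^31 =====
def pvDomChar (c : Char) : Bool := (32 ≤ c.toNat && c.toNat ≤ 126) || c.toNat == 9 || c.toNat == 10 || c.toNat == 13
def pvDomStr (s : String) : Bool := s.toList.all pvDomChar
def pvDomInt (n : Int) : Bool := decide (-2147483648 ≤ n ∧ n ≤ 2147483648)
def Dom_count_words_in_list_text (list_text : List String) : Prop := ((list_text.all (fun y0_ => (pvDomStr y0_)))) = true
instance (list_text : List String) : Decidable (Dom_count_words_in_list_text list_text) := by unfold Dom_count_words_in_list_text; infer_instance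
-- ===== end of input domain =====

-- B replaces A's shared mutable dict (zeroed and re-incremented per text) by per-text word lists,
-- an ordered dedup for the vocabulary and a per-row count; objective: simpler.

-- word.strip('.,;:-?"!').lower(), shared normalization helper of both programs
def pvNorm (w : String) : String := PySem.Str.lower (PySem.Str.stripChars w ".,;:-?\"!")

-- ===== PORT A =====
def zero_values (d : PySem.Dict String Int) : PySem.Dict String Int :=
  d.keys.foldl (fun d' k => d'.insert k 0) d

def get_unique_words_in_list_text (list_text : List String) : PySem.Dict String Int :=
  list_text.foldl (fun d text =>
    (PySem.Str.split₀ text).foldl (fun d w => d.insert (pvNorm w) 0) d) PySem.Dict.empty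

def count_words_in_list_text (list_text : List String) : List String × List (List Int) :=
  let unique_words := get_unique_words_in_list_text list_text
  -- unique_words[word] += 1: the key is always present (it was inserted by the first pass over the
  -- same list), so Dict.modify with default 0 is exact here (Python's KeyError case is unreachable)
  let st := list_text.foldl (fun (st : PySem.Dict String Int × List (List Int)) text =>
    let d1 := zero_values st.1
    let d2 := (PySem.Str.split₀ text).foldl (fun d w => d.modify (pvNorm w) 0 (· + 1)) d1
    (d2, st.2 ++ [d2.values])) (unique_words, [])
  (st.1.keys, st.2)

-- ===== PORT B =====
def count_words_in_list_text_alt (list_text : List String) : List String × List (List Int) :=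
  let words_per_text := list_text.map (fun text => (PySem.Str.split₀ text).map pvNorm)
  let vocab := PySem.List.dedup words_per_text.flatten
  let matrix := words_per_text.map (fun ws => vocab.map (fun w => (PySem.List.count ws w : Int)))
  (vocab, matrix)

-- ===== PRECONDITION & SPEC =====
def Spec_count_words_in_list_text (list_text : List String) (out : List String × List (List Int)) : Prop := out = count_words_in_list_text_alt list_text
instance (list_text : List String) (out : List String × List (List Int)) : Decidable (Spec_count_words_in_list_text list_text out) := by unfold Spec_count_words_in_list_text; infer_instance

-- ===== CLAIM (what is proved, stated in full; the proofs are below) =====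
def Claim_equal_count_words_in_list_text : Prop := ∀ (list_text : List String), Dom_count_words_in_list_text list_text → Spec_count_words_in_list_text list_text (count_words_in_list_text list_text)

-- ===== LEMMAS AND PROOFS =====

-- Set.update by elements already present is the identity
theorem pv_update_of_subset (s : PySem.Set String) (l : List String)
    (h : ∀ x ∈ l, x ∈ s) : PySem.Set.update s l = s := by
  rw [PySem.Set.update_eq_append_filter]
  have hf : ((PySem.Set.ofList l).filter (fun y => !(PySem.Set.contains s y))) = [] := by
    apply List.filter_eq_nil_iff.mpr
    intro y hy
    have hyl : y ∈ l := by
      have := PySem.Set.mem_ofList (xs := l) (y := y)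
      tauto
    simp [PySem.Set.contains_eq_listContains, h y hyl]
  rw [hf, List.append_nil]

-- a fold of insert‑0 does not touch keys outside the list
theorem pv_getD_foldl_insert0_not_mem (l : List String) (d : PySem.Dict String Int)
    (x : String) (hx : x ∉ l) :
    (l.foldl (fun d k => d.insert k 0) d).getD x 0 = d.getD x 0 := by
  induction l generalizing d with
  | nil => rfl
  | cons k rest ih =>
    simp only [List.foldl_cons]
    rw [ih _ (fun h => hx (List.mem_cons_of_mem _ h))]
    have hne : x ≠ k := fun h => hx (by rw [h]; exact List.mem_cons_self)
    rw [PySem.Dict.getD_insert]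
    simp [hne]

-- a fold of insert‑0 zeroes every key in the list
theorem pv_getD_foldl_insert0_mem (l : List String) (d : PySem.Dict String Int)
    (x : String) (hx : x ∈ l) :
    (l.foldl (fun d k => d.insert k 0) d).getD x 0 = 0 := by
  induction l generalizing d with
  | nil => cases hx
  | cons k rest ih =>
    simp only [List.foldl_cons]
    by_cases hr : x ∈ rest
    · exact ih _ hr
    · have hxk : x = k := by cases hx with | head => rfl | tail _ h => exact absurd h hr
      rw [pv_getD_foldl_insert0_not_mem rest _ x hr, hxk]
      simp [PySem.Dict.getD_insert_self]

theorem pv_keys_zero (d : PySem.Dict String Int) : (zero_values d).keys = d.keys := by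
  unfold zero_values
  rw [PySem.Dict.keys_foldl_insert]
  exact pv_update_of_subset d.keys d.keys (fun x hx => hx)

theorem pv_getD_zero (d : PySem.Dict String Int) (x : String) (hx : x ∈ d.keys) :
    (zero_values d).getD x 0 = 0 :=
  pv_getD_foldl_insert0_mem d.keys d x hx

-- the vocabulary pass: keys of A's first dict = Set.update of the flattened normalized words
theorem pv_keys_unique (ts : List String) (d : PySem.Dict String Int) :
    (ts.foldl (fun d text =>
      (PySem.Str.split₀ text).foldl (fun d w => d.insert (pvNorm w) 0) d) d).keys
    = PySem.Set.update d.keys (ts.map (fun t => (PySem.Str.split₀ t).map pvNorm)).flatten := by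
  induction ts generalizing d with
  | nil => simp [PySem.Set.update_nil]
  | cons t rest ih =>
    simp only [List.foldl_cons, List.map_cons, List.flatten_cons]
    rw [ih, PySem.Dict.keys_foldl_insert_key, PySem.Set.update_append]

-- the per-text loop of A: keys are preserved and each appended row is the count row over the keys
theorem pv_loop (ts : List String) (d : PySem.Dict String Int) (m : List (List Int))
    (hnd : d.keys.Nodup)
    (hmem : ∀ t ∈ ts, ∀ w ∈ (PySem.Str.split₀ t).map pvNorm, w ∈ d.keys) :
    (ts.foldl (fun (st : PySem.Dict String Int × List (List Int)) text =>
      let d1 := zero_values st.1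
      let d2 := (PySem.Str.split₀ text).foldl (fun d w => d.modify (pvNorm w) 0 (· + 1)) d1
      (d2, st.2 ++ [d2.values])) (d, m)).1.keys = d.keys ∧
    (ts.foldl (fun (st : PySem.Dict String Int × List (List Int)) text =>
      let d1 := zero_values st.1
      let d2 := (PySem.Str.split₀ text).foldl (fun d w => d.modify (pvNorm w) 0 (· + 1)) d1
      (d2, st.2 ++ [d2.values])) (d, m)).2
      = m ++ ts.map (fun t => d.keys.map (fun k =>
          ((((PySem.Str.split₀ t).map pvNorm).count k : Nat) : Int))) := by
  induction ts generalizing d m with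
  | nil => simp
  | cons t rest ih =>
    have hws : ∀ w ∈ (PySem.Str.split₀ t).map pvNorm, w ∈ d.keys :=
      hmem t (List.mem_cons_self)
    set ws := (PySem.Str.split₀ t).map pvNorm with hws_def
    have hfold : (PySem.Str.split₀ t).foldl (fun d w => d.modify (pvNorm w) 0 (· + 1)) (zero_values d)
        = ws.foldl (fun d w => d.modify w 0 (· + 1)) (zero_values d) := by
      rw [hws_def, List.foldl_map]
    have hd2keys : (ws.foldl (fun d w => d.modify w 0 (· + 1)) (zero_values d)).keys = d.keys := by
      rw [PySem.Dict.keys_foldl_modify, pv_keys_zero]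
      exact pv_update_of_subset d.keys ws hws
    have hd2nd : (ws.foldl (fun d w => d.modify w 0 (· + 1)) (zero_values d)).keys.Nodup := by
      rw [hd2keys]; exact hnd
    have hd2getD : ∀ k ∈ d.keys,
        (ws.foldl (fun d w => d.modify w 0 (· + 1)) (zero_values d)).getD k 0 = (ws.count k : Int) := by
      intro k hk
      rw [PySem.Dict.getD_foldl_modify_add_one, pv_getD_zero d k hk, zero_add]
    have hd2vals : (ws.foldl (fun d w => d.modify w 0 (· + 1)) (zero_values d)).values
        = d.keys.map (fun k => ((ws.count k : Nat) : Int)) := by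
      rw [PySem.Dict.values_eq_map_keys _ hd2nd 0, hd2keys]
      exact List.map_congr_left (fun k hk => hd2getD k hk)
    simp only [List.foldl_cons, List.map_cons]
    rw [hfold]
    have hrest := ih (ws.foldl (fun d w => d.modify w 0 (· + 1)) (zero_values d))
      (m ++ [(ws.foldl (fun d w => d.modify w 0 (· + 1)) (zero_values d)).values])
      hd2nd
      (by rw [hd2keys]; exact fun t' ht' => hmem t' (List.mem_cons_of_mem _ ht'))
    rw [hd2keys] at hrest
    refine ⟨hrest.1, ?_⟩
    rw [hrest.2, hd2vals, List.append_assoc]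
    rfl

-- ===== VERDICT (by name: the statement is the Claim_ definition above) =====
theorem count_words_in_list_text_spec : Claim_equal_count_words_in_list_text := by
  intro list_text _
  unfold Spec_count_words_in_list_text count_words_in_list_text count_words_in_list_text_alt
  simp only []
  set wss := list_text.map (fun t => (PySem.Str.split₀ t).map pvNorm) with hwss
  have hkeys0 : (get_unique_words_in_list_text list_text).keys = PySem.List.dedup wss.flatten := by
    unfold get_unique_words_in_list_text
    rw [pv_keys_unique, PySem.List.dedup_eq_ofList]
    simp only [PySem.Dict.keys_empty, PySem.Set.update_nil_left]
    rw [hwss]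
  have hnd : (get_unique_words_in_list_text list_text).keys.Nodup := by
    rw [hkeys0, PySem.List.dedup_eq_ofList]; exact PySem.Set.nodup_ofList _
  have hmem : ∀ t ∈ list_text, ∀ w ∈ (PySem.Str.split₀ t).map pvNorm,
      w ∈ (get_unique_words_in_list_text list_text).keys := by
    intro t ht w hw
    rw [hkeys0, PySem.List.dedup_eq_ofList]
    have : w ∈ wss.flatten := by
      apply List.mem_flatten.mpr
      exact ⟨(PySem.Str.split₀ t).map pvNorm, List.mem_map_of_mem ht, hw⟩
    have h := PySem.Set.mem_ofList (xs := wss.flatten) (y := w)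
    tauto
  have h := pv_loop list_text (get_unique_words_in_list_text list_text) [] hnd hmem
  refine Prod.ext ?_ ?_
  · simpa [hkeys0] using h.1
  · simp only [h.2, List.nil_append, hkeys0]
    rw [List.map_map]
    rfl
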